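-- pv_equiv track=rewrite | github.com/umairz5723/Coachable-Umair-Zaib-Repository | leetcode/ibm_minimum_difference.py | ibm_minimum_difference2
-- ===== SOURCE A (Python) =====
-- from typing import List
--
-- def ibm_minimum_difference2(measurements: List[int]) -> List[List[int]]:
--     """
--     This function solves the minimum difference problem
--     by sorting the input list to extract the existing
--     minimum difference.
--
--     We then iterate over the sorted list again to collect
--     all pairs that have a difference that matches our
--     min_diff variable.
--     """
--     # Sort the list to extract the min diff
--     measurements.sort()
--     min_diff = float("inf")
--
--     for i in range(len(measurements)-1):
--         min_diff = min(min_diff, abs(measurements[i+1]-measurements[i]))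
--
--     res = []
--     # Now loop through the sorted list again and collect all pairs that have the min_diff
--     for i in range(len(measurements)-1):
--         if abs(measurements[i+1] - measurements[i]) == min_diff:
--             res.append([measurements[i], measurements[i+1]])
--
--     return res
-- ===== SOURCE B (Python) =====
-- from typing import List
--
-- def ibm_minimum_difference2(measurements: List[int]) -> List[List[int]]:
--     # Single pass over adjacent pairs of the sorted list, keeping the running
--     # minimum difference and resetting the result list when it improves.
--     # (Sorts the input list in place, like the original.)
--     measurements.sort()
--     min_diff = float("inf")
--     res = []
--     for cur, nxt in zip(measurements, measurements[1:]):
--         d = abs(nxt - cur)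
--         if d < min_diff:
--             min_diff = d
--             res = [[cur, nxt]]
--         elif d == min_diff:
--             res.append([cur, nxt])
--     return res
-- ===== Notes on version B (the rewrite author's own statement) =====
-- stated objective: alternative
-- what changed: Replaces A's two sequential scans (one to compute the minimum adjacent difference, one to collect matching pairs) by a single pass over adjacent pairs that maintains the running minimum and resets the collected pairs whenever a strictly smaller difference appears.
import Mathlib
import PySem

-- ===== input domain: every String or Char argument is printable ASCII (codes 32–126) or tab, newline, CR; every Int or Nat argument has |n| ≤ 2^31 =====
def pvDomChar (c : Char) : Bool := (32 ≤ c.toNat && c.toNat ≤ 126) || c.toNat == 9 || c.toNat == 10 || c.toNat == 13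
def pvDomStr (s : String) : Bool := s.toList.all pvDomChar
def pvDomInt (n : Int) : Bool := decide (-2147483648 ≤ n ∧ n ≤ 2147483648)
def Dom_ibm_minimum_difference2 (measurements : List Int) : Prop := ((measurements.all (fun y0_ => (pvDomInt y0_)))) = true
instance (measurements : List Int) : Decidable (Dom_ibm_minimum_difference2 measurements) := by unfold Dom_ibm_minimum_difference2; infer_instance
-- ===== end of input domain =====

-- B fuses A's two scans into one pass with a running minimum; equivalence is about the
-- RETURN value (both Pythons sort the argument list in place, an observable mutation).

-- ===== PORT A =====
-- A's 'for i in range(len(m)-1)' loops read m[i], m[i+1]: transcribed exactly as folds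
-- over the adjacent pairs 'zip s s.tail' of the sorted list (same values, same order).
-- min_diff starts at float('inf'): modelled as 'none' (min(inf,d)=d; 'some d = none' is false).
def ibm_minimum_difference2 (measurements : List Int) : List (List Int) :=
  let s := PySem.List.sorted measurements (fun x => x) false
  let min_diff := (s.zip s.tail).foldl
    (fun m p => match m with
      | none => some |p.2 - p.1|
      | some mv => some (min mv |p.2 - p.1|)) none
  (s.zip s.tail).foldl
    (fun res p => if some |p.2 - p.1| = min_diff then res ++ [[p.1, p.2]] else res) []

-- ===== PORT B =====
-- single pass: state = (running min_diff, collected pairs); reset on strict improvement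
def pvStepB (st : Option Int × List (List Int)) (p : Int × Int) : Option Int × List (List Int) :=
  let d := |p.2 - p.1|
  match st.1 with
  | none => (some d, [[p.1, p.2]])
  | some mv =>
      if d < mv then (some d, [[p.1, p.2]])
      else if d = mv then (some mv, st.2 ++ [[p.1, p.2]])
      else st

def ibm_minimum_difference2_alt (measurements : List Int) : List (List Int) :=
  let s := PySem.List.sorted measurements (fun x => x) false
  ((s.zip s.tail).foldl pvStepB (none, [])).2

-- ===== PRECONDITION & SPEC =====
def Spec_ibm_minimum_difference2 (measurements : List Int) (out : List (List Int)) : Prop := out = ibm_minimum_difference2_alt measurements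
instance (measurements : List Int) (out : List (List Int)) : Decidable (Spec_ibm_minimum_difference2 measurements out) := by unfold Spec_ibm_minimum_difference2; infer_instance

-- ===== CLAIM (what is proved, stated in full; the proofs are below) =====
def Claim_equal_ibm_minimum_difference2 : Prop := ∀ (measurements : List Int), Dom_ibm_minimum_difference2 measurements → Spec_ibm_minimum_difference2 measurements (ibm_minimum_difference2 measurements)

-- ===== LEMMAS AND PROOFS =====

-- A's first fold, abbreviated
def pvMinA (m : Option Int) (L : List (Int × Int)) : Option Int :=
  L.foldl (fun m p => match m with
    | none => some |p.2 - p.1|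
    | some mv => some (min mv |p.2 - p.1|)) m

-- A's second fold, started from []
def pvCollA (md : Option Int) (L : List (Int × Int)) : List (List Int) :=
  L.foldl (fun res p => if some |p.2 - p.1| = md then res ++ [[p.1, p.2]] else res) []

lemma pvCollA_acc (md : Option Int) (L : List (Int × Int)) : ∀ acc : List (List Int),
    L.foldl (fun res p => if some |p.2 - p.1| = md then res ++ [[p.1, p.2]] else res) acc
      = acc ++ pvCollA md L := by
  induction L with
  | nil => intro acc; simp [pvCollA]
  | cons p L ih =>
      intro acc
      simp only [pvCollA, List.foldl_cons]
      split_ifs with h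
      · rw [ih, ih ([] ++ [[p.1, p.2]])]; simp
      · rw [ih, ih []]; simp

lemma pvCollA_cons (md : Option Int) (p : Int × Int) (L : List (Int × Int)) :
    pvCollA md (p :: L) =
      (if some |p.2 - p.1| = md then [[p.1, p.2]] else []) ++ pvCollA md L := by
  simp only [pvCollA, List.foldl_cons]
  split_ifs with h
  · rw [show (([] : List (List Int)) ++ [[p.1, p.2]] : List (List Int)) = [[p.1, p.2]] from rfl,
        ← pvCollA, pvCollA_acc]
  · simp

lemma pvMinA_le (L : List (Int × Int)) : ∀ mv : Int,
    ∃ c, pvMinA (some mv) L = some c ∧ c ≤ mv := by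
  induction L with
  | nil => intro mv; exact ⟨mv, rfl, le_refl _⟩
  | cons p L ih =>
      intro mv
      obtain ⟨c, hc, hle⟩ := ih (min mv |p.2 - p.1|)
      exact ⟨c, hc, le_trans hle (min_le_left _ _)⟩

lemma pvScanB_inv (L : List (Int × Int)) : ∀ (mv : Int) (res : List (List Int)),
    L.foldl pvStepB (some mv, res) =
      (pvMinA (some mv) L,
       (if pvMinA (some mv) L = some mv then res else []) ++ pvCollA (pvMinA (some mv) L) L) := by
  induction L with
  | nil => intro mv res; simp [pvMinA, pvCollA]
  | cons p L ih =>
      intro mv res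
      have hmin : pvMinA (some mv) (p :: L) = pvMinA (some (min mv |p.2 - p.1|)) L := rfl
      set d : Int := |p.2 - p.1| with hd
      rcases lt_trichotomy d mv with hlt | heq | hgt
      · -- strict improvement: reset
        have hstep : pvStepB (some mv, res) p = (some d, [[p.1, p.2]]) := by
          simp [pvStepB, hlt, ← hd]
        obtain ⟨c, hc, hcle⟩ := pvMinA_le L d
        have hcL : pvMinA (some mv) (p :: L) = some c := by
          rw [hmin, min_eq_right (le_of_lt hlt)]; exact hc
        rw [List.foldl_cons, hstep, ih d [[p.1, p.2]], hcL, hc, pvCollA_cons, ← hd]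
        have hne : (some c : Option Int) ≠ some mv := by
          intro h; have := Option.some.inj h; omega
        by_cases hdc : d = c
        · subst hdc; simp [hne]
        · have h1 : (some c : Option Int) ≠ some d := by
            intro h; exact hdc (Option.some.inj h).symm
          have h2 : (some d : Option Int) ≠ some c := by
            intro h; exact hdc (Option.some.inj h)
          simp [hne, h1, h2]
      · -- equal: append
        subst heq
        have hstep : pvStepB (some d, res) p = (some d, res ++ [[p.1, p.2]]) := by
          simp [pvStepB, ← hd]
        obtain ⟨c, hc, hcle⟩ := pvMinA_le L d
        have hcL : pvMinA (some d) (p :: L) = some c := by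
          rw [hmin, min_self]; exact hc
        rw [List.foldl_cons, hstep, ih d (res ++ [[p.1, p.2]]), hcL, hc, pvCollA_cons, ← hd]
        by_cases hdc : c = d
        · subst hdc; simp
        · have h1 : (some c : Option Int) ≠ some d := by
            intro h; exact hdc (Option.some.inj h)
          have h2 : (some d : Option Int) ≠ some c := by
            intro h; exact hdc (Option.some.inj h).symm
          simp [h1, h2]
      · -- worse: skip
        have hstep : pvStepB (some mv, res) p = (some mv, res) := by
          simp [pvStepB, not_lt.mpr (le_of_lt hgt), (ne_of_gt hgt), ← hd]
        obtain ⟨c, hc, hcle⟩ := pvMinA_le L mv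
        have hcL : pvMinA (some mv) (p :: L) = some c := by
          rw [hmin, min_eq_left (le_of_lt hgt)]; exact hc
        rw [List.foldl_cons, hstep, ih mv res, hcL, hc, pvCollA_cons, ← hd]
        have h2 : (some d : Option Int) ≠ some c := by
          intro h; have := Option.some.inj h; omega
        simp [h2]

-- ===== VERDICT (by name: the statement is the Claim_ definition above) =====
theorem ibm_minimum_difference2_spec : Claim_equal_ibm_minimum_difference2 := by
  intro measurements _
  unfold Spec_ibm_minimum_difference2 ibm_minimum_difference2 ibm_minimum_difference2_alt
  set s := PySem.List.sorted measurements (fun x => x) false with hs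
  cases hz : s.zip s.tail with
  | nil => simp only [hz]; rfl
  | cons p L =>
      simp only
      rw [show (s.zip s.tail).foldl
            (fun m p => match m with
              | none => some |p.2 - p.1|
              | some mv => some (min mv |p.2 - p.1|)) none = pvMinA none (s.zip s.tail) from rfl,
          show ∀ md, (s.zip s.tail).foldl
            (fun res p => if some |p.2 - p.1| = md then res ++ [[p.1, p.2]] else res) []
            = pvCollA md (s.zip s.tail) from fun _ => rfl,
          hz]
      have h0 : pvMinA none (p :: L) = pvMinA (some |p.2 - p.1|) L := rfl
      have hstep0 : pvStepB (none, []) p = (some |p.2 - p.1|, [[p.1, p.2]]) := rfl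
      obtain ⟨c, hc, hcle⟩ := pvMinA_le L |p.2 - p.1|
      rw [List.foldl_cons, hstep0, pvScanB_inv L |p.2 - p.1| [[p.1, p.2]], h0, hc,
          pvCollA_cons]
      by_cases hdc : c = |p.2 - p.1|
      · subst hdc; simp
      · have h1 : (some c : Option Int) ≠ some |p.2 - p.1| := by
          intro h; exact hdc (Option.some.inj h)
        have h2 : (some |p.2 - p.1| : Option Int) ≠ some c := by
          intro h; exact hdc (Option.some.inj h).symm
        simp [h1, h2]
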